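-- pv_equiv track=rewrite | github.com/maxoftime/john-jansson-klapare | johnJanssonKlaparesDag.py | year_lister
-- ===== SOURCE A (Python) =====
-- def year_lister(events):
--   year = 0
--
--   years_list = []
--   i = 0
--   for event in events:
--     if event['startDate'][0:4] != year:
--       year = event['startDate'][0:4]
--       years_list.append(year)
--       i += 1
--   return years_list
-- ===== SOURCE B (Python) =====
-- def year_lister(events):
--   def run_keys(ys):
--     # groupby-style: emit the key of the first maximal run, recurse on the remainder
--     if not ys:
--       return []
--     head = ys[0]
--     i = 0
--     while i < len(ys) and ys[i] == head:
--       i += 1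
--     return [head] + run_keys(ys[i:])
--   return run_keys([event['startDate'][0:4] for event in events])
-- ===== Notes on version B (the rewrite author's own statement) =====
-- stated objective: alternative
-- what changed: Replaces A's single stateful pass carrying a last-seen 'year' register (initialised to the int 0) and a dead counter with a groupby-style recursion: project all events to year prefixes, then recursively split off each maximal run of equal years and emit one key per run.
import Mathlib
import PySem

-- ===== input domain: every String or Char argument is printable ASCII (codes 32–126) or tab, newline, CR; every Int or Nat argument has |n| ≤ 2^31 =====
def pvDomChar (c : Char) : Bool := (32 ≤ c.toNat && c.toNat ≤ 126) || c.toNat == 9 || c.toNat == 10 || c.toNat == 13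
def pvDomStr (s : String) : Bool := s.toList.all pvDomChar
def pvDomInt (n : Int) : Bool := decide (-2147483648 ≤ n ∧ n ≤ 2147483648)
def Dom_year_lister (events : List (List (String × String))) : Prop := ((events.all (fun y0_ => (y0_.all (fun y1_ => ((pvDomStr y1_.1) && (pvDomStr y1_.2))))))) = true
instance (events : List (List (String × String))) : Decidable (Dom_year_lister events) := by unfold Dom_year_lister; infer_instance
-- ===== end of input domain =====

-- B replaces A's stateful last-seen dedup loop by a groupby-style recursion: map to year
-- prefixes, then split off maximal runs and emit one key per run (alternative decomposition,
-- same cost). Pre_ excludes inputs where an event lacks 'startDate' (A raises KeyError).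


-- ===== PORT A =====
-- event['startDate'][0:4]; under Pre_ the key is present (getD "" is never taken there)
def yearPrefix (event : List (String × String)) : String :=
  PySem.Str.slice ((PySem.Dict.get? (PySem.Dict.ofList event) "startDate").getD "") (some 0) (some 4)

-- loop state: (year, years_list, i); year starts as the int 0, modelled as `none`
-- (a string prefix never equals the int 0 in Python, hence `none ≠ some _` always fires)
def yearStep (st : Option String × List String × Int) (event : List (String × String)) :
    Option String × List String × Int :=
  if st.1 ≠ some (yearPrefix event) then
    (some (yearPrefix event), st.2.1 ++ [yearPrefix event], st.2.2 + 1)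
  else st

def year_lister (events : List (List (String × String))) : List String :=
  (events.foldl yearStep (none, [], 0)).2.1

-- ===== PORT B =====
-- Source B's `while i < len(ys) and ys[i] == head: i += 1; ... ys[i:]` drops the maximal
-- leading run of elements equal to head; ported as dropWhile (exact on lists)
def runKeys : List String → List String
  | [] => []
  | y :: ys => y :: runKeys (ys.dropWhile (fun z => z == y))
termination_by ys => ys.length
decreasing_by
  simp only [List.length_cons]
  exact Nat.lt_succ_of_le (List.length_dropWhile_le _ _)

def year_lister_alt (events : List (List (String × String))) : List String :=
  runKeys (events.map yearPrefix)

-- ===== PRECONDITION & SPEC =====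
-- Pre_ excludes exactly the inputs where some event lacks the key 'startDate': Python A raises KeyError there.
def Pre_year_lister (events : List (List (String × String))) : Prop :=
  ∀ e ∈ events, (PySem.Dict.get? (PySem.Dict.ofList e) "startDate").isSome = true
instance (events : List (List (String × String))) : Decidable (Pre_year_lister events) := by
  unfold Pre_year_lister; infer_instance

def pvWitness_year_lister : (List (List (String × String))) :=
  [[("startDate", "2019-01-02")], [("startDate", "2019-05-06")], [("startDate", "2020-01-01")]]

def Spec_year_lister (events : List (List (String × String))) (out : List String) : Prop := out = year_lister_alt events
instance (events : List (List (String × String))) (out : List String) : Decidable (Spec_year_lister events out) := by unfold Spec_year_lister; infer_instance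

-- ===== CLAIM (what is proved, stated in full; the proofs are below) =====
def Claim_equal_year_lister : Prop := ∀ (events : List (List (String × String))), Dom_year_lister events → Pre_year_lister events → Spec_year_lister events (year_lister events)

-- ===== LEMMAS AND PROOFS =====

-- proof-only: adjacent dedup of a year list with known previous element
def adjDedup (prev : String) : List String → List String
  | [] => []
  | z :: zs => if z ≠ prev then z :: adjDedup z zs else adjDedup prev zs

theorem foldl_yearStep_some (events : List (List (String × String))) :
    ∀ (c : String) (acc : List String) (i : Int),
      (events.foldl yearStep (some c, acc, i)).2.1
        = acc ++ adjDedup c (events.map yearPrefix) := by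
  induction events with
  | nil => intro c acc i; simp [adjDedup]
  | cons e es ih =>
      intro c acc i
      by_cases h : yearPrefix e = c
      · simp [List.foldl, yearStep, h, adjDedup, ih]
      · simp [List.foldl, yearStep, h, Ne.symm h, adjDedup, ih]

-- the loop over events equals adjacent dedup of the mapped year prefixes
theorem year_lister_eq_adj (events : List (List (String × String))) :
    year_lister events =
      match events.map yearPrefix with
      | [] => []
      | y :: ys => y :: adjDedup y ys := by
  cases events with
  | nil => rfl
  | cons e es =>
      unfold year_lister
      simp [List.foldl, yearStep, foldl_yearStep_some]

-- adjacent dedup after a known head equals run-splitting after dropping that head's run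
theorem adjDedup_eq_runKeys_drop (zs : List String) :
    ∀ y : String, adjDedup y zs = runKeys (zs.dropWhile (fun z => z == y)) := by
  induction zs with
  | nil => intro y; simp [adjDedup, runKeys]
  | cons z zs ih =>
      intro y
      by_cases h : z = y
      · subst h; simp [adjDedup, List.dropWhile, ih]
      · rw [List.dropWhile_cons_of_neg (by simp [h])]
        rw [runKeys]
        simp [adjDedup, h, ih]

-- ===== VERDICT (by name: the statement is the Claim_ definition above) =====
theorem year_lister_spec : Claim_equal_year_lister := by
  intro events _ _
  unfold Spec_year_lister year_lister_alt
  rw [year_lister_eq_adj]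
  cases h : events.map yearPrefix with
  | nil => simp [runKeys]
  | cons y ys => simp [runKeys, adjDedup_eq_runKeys_drop]
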